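/- GENERATED by mk_final_copies.py from the proof of the farm's unit `start_decoder.F4b` (farm:start_decoder.F4b.1: Proof.lean) as the
   re-elaboration sweep compiled it — do not edit. -/
import Asan.CheckWalk
import Vorbis.Spec.Reader
import Vorbis.Spec.Units.start_decoder_F4b
import Vorbis.Spec.Worked.start_decoder_F4b_Lemmas

open X86 X86.User Asan Vorbis Vorbis.Spec Vorbis.Spec.StartDecoder

set_option maxRecDepth 4000
set_option maxHeartbeats 4000000

namespace Vorbis.Spec.start_decoder_F4b

/-- The byte stored by `lea r15d,[rax+1] ; mov [..],r15b` for a `get_bits(f, 3)` result: `z + 1`, no wrap. -/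
theorem f4b_byte (z : Word) (hz : z.toNat < 8) :
    (BitVec.setWidth 8 (BitVec.setWidth 32 (z + 1).toBitVec)).toNat = z.toNat + 1 := by
  have e : (z + 1).toNat = z.toNat + 1 := by
    rw [UInt64.toNat_add]
    have : (1 : UInt64).toNat = 1 := rfl
    rw [this]
    omega
  simp only [BitVec.toNat_setWidth, UInt64.toNat_toBitVec, e]
  omega

/-- **0x1154af → the return of `get_bits(f, 2)`** (`cut209` = 0x1154d2): `lea r15d,[rax+1] ; movsxd r14,r12d`, the checked byte store
`class_dimensions[j] = eax + 1` (check site by `Floor.site`, offset `21H + j`), `get_bits(f, 2)` (its precondition: `Floor.reader_pre`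
with `Bits` by `Floor.bits_quiet` over the push and the byte store). At the return: the stored byte read through the callee's footprint
(`u_frame`, BEFORE `hsame`), ONE `Floor.carry` with the element's part `[21H + j, 22H + j)`, `Floor.floor4_carry`, `Floor.classes_row`. -/
theorem f4b_tail {Lay : Layout} (hLay : Lay.hi = 0x1000000) {μ : Microarch} (hμ : UserX.MicroOK μ) {u₀ : State}
    (hcode : HasCodeNat Lay u₀ Vorbis.L.start_decoder.entry Vorbis.Code.code_start_decoder.nat Vorbis.L.start_decoder.size)
    (hgb : ∀ (others : List Obj) (frames : List (Nat × FrameLayout)) (Blk : Block → Prop) (len : Nat),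
      Calls Lay μ Vorbis.WayInv (Vorbis.conv u₀) Vorbis.L.get_bits.entry (Vorbis.Spec.get_bits.spec others frames Blk len))
    (hst1 : Asan.SmallCheck Lay μ Vorbis.WayInv (Vorbis.CodeOK u₀) [.rax, .rdx] 1 Vorbis.L.__asan_store1_noabort.entry)
    {g : Ghost} {i : Nat} {A5 : Arena} {A : Arena × List Obj} {mc : Int} {j : Nat} {v : State}
    (hat : F4bMid u₀ g i A5 A mc j v) :
    ReachVia Lay μ WayInv v (fun w => ClassMid u₀ g i A5 A mc j w) := by
  have hloop := hat.in4.loop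
  have hlt := hat.in4.cur.lt
  have hfr := hloop.frame
  have he := hfr.entry
  v_entry he
  simp only [depth] at he_room he_stack
  have hgb' := hgb A.2 g.frames' (g.Blk A) g.len
  have hgeo := Floor.geo hloop hlt
  obtain ⟨r8, rlo, rhi, ra, flo, fhi, fstack, farena, flog, fc1, fc64, ilt, gdef, blo, bhi, btext, bstack, bdata, blog⟩ := hgeo
  have hmc2 := hat.in4.cur.mc_hi
  have hj := hat.j_le
  have hj31 : j < 2 ^ 31 := by omega
  obtain ⟨R, hR⟩ : ∃ R, R = g.R := ⟨_, rfl⟩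
  obtain ⟨f, hfe⟩ : ∃ f, f = g.f := ⟨_, rfl⟩
  obtain ⟨gi, hgi⟩ : ∃ gi, gi = floorAt g v.mem i := ⟨_, rfl⟩
  obtain ⟨z, hz⟩ : ∃ z, v.reg .rax = z := ⟨_, rfl⟩
  have hz8 : z.toNat < 8 := by
    rw [← hz]
    exact hat.rax
  have w_rip := hfr.rip
  have c_rsp := hfr.rsp
  have c_rbp := hloop.rbp
  have c_rbx := hat.in4.rbx
  have c_r12 : v.reg .r12 = UInt64.ofNat j := hat.r12
  have c_rax := hz
  rw [← hR] at c_rsp r8 rlo rhi ra fstack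
  rw [← hfe] at c_rbp flo fhi fstack farena flog
  rw [← hgi] at c_rbx gdef
  simp only [addr] at c_rsp c_rbp c_rbx
  have w_eq : Mem.EqOn Vorbis.L.textLo Vorbis.L.textHi u₀.mem v.mem := hfr.code
  have hdf : v.flags .df = false := (show abiInv _ from hfr.inv).1
  have hmx : v.mxcsr &&& 0x1F80 = 0x1F80 := (show abiInv _ from hfr.inv).2
  have hsse := Vorbis.sseOK_of_abiInv hfr.inv
  u_walk hcode [hμ.vendor, Vorbis.Spec.cnt32_sext j hj31] until [Vorbis.L.start_decoder.cut209] span [Vorbis.L.textLo, Vorbis.L.textHi] side (v_side)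
  case check_1154bb =>
    have hun : ShadowUntouched v.mem s_1154bb.mem := by v_untouched
    have hs := Floor.site hloop hlt (0x21 + j) 1 (Nat.le_refl _) (by simp only [Off.sizeof.Floor]; omega)
    refine Vorbis.Spec.check_site hfr.shadow hun hs ?_
    rw [← hgi]
    u_omega
  case call_inv => v_inv
  case pre_1154cd =>
    have hun : ShadowUntouched v.mem s_1154cd.mem := by v_untouched
    have hrdi : (s_1154cd.reg .rdi).toNat = g.f := by
      rw [w_rdi, hfe]
      exact toNat_addr g.f (by omega)
    have hq : ∀ w, w ∈ [(⟨R - 8, R⟩ : Span), ⟨gi + 0x21 + j, gi + 0x22 + j⟩] → Floor.Quiet g (floorAt g v.mem i) (0x21 + j) (0x22 + j) w := by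
      intro w hw
      simp only [List.mem_cons, List.mem_nil_iff, or_false] at hw
      unfold Floor.Quiet
      rcases hw with rfl | rfl
      all_goals simp only []
      all_goals omega
    have hsm : Mem.SameExcept [(⟨R - 8, R⟩ : Span), ⟨gi + 0x21 + j, gi + 0x22 + j⟩] v.mem s_1154cd.mem := by
      u_same
    refine ⟨Floor.reader_pre hloop ?_ hun hrdi ?_, ?_⟩
    · rw [w_rsp, ← hR]
      u_omega
    · exact Floor.bits_quiet (Floor.geo hloop hlt) hloop.mid.bits hsm hq (by omega)
    · rw [bitsArg_def, w_rsi]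
      decide
  case cont =>
    have hrdi : (s_1154cd.reg .rdi).toNat = f := by
      rw [w_rdi_1154cd]
      exact toNat_addr f (by omega)
    obtain ⟨hpu, hpb⟩ := w_post
    rw [hrdi] at hpb
    v_after_call w_rsp_1154cd w_mem_1154cd
    simp only [w_rdi_1154cd] at w_same
    have hun0 : ShadowUntouched v.mem s_1154cd.mem := by
      rw [w_mem_1154cd]
      v_untouched
    have hun : ShadowUntouched v.mem s_1154cdr.mem := Mem.EqOn.trans hun0 hpu
    -- the byte stored at 0x1154c0, read through the callee's footprint
    have eb := f4b_byte z hz8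
    have hd0 : s_1154cd.mem.readLE (UInt64.ofNat gi + UInt64.ofNat j + 33) 1 = z.toNat + 1 := by
      rw [← eb]
      u_resolve
      rw [eb]
      omega
    rw [w_mem_1154cd] at hd0
    have hd1 : s_1154cdr.mem.readLE (UInt64.ofNat gi + UInt64.ofNat j + 33) 1 = z.toNat + 1 := by
      u_frame hd0
    have hsame : Mem.SameExcept [⟨R - 408, R⟩, ⟨f + 48, f + 56⟩, ⟨f + 84, f + 96⟩, ⟨f + 136, f + 144⟩,
        ⟨f + 1484, f + 1749⟩, ⟨f + 1752, f + 1784⟩, ⟨gi + 0x21 + j, gi + 0x22 + j⟩] v.mem s_1154cdr.mem := by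
      u_same
    rw [hR, hfe, hgi] at hsame
    have hws : ∀ w, w ∈ [(⟨g.R - 408, g.R⟩ : Span), ⟨g.f + 48, g.f + 56⟩, ⟨g.f + 84, g.f + 96⟩, ⟨g.f + 136, g.f + 144⟩,
        ⟨g.f + 1484, g.f + 1749⟩, ⟨g.f + 1752, g.f + 1784⟩,
        ⟨floorAt g v.mem i + 0x21 + j, floorAt g v.mem i + 0x22 + j⟩] →
        Floor.Win g (floorAt g v.mem i) (0x21 + j) (0x22 + j) w := by
      intro w hw
      simp only [List.mem_cons, List.mem_nil_iff, or_false] at hw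
      unfold Floor.Win
      rcases hw with rfl | rfl | rfl | rfl | rfl | rfl | rfl
      all_goals simp only []
      all_goals omega
    have earg : bitsArg s_1154cd = 2 := by
      rw [bitsArg_def, w_rsi_1154cd]
      rfl
    have e1 : s_1154cdr.reg .rsp = addr g.R := by
      rw [w_rsp, hR]
      rfl
    have e2 : s_1154cdr.reg .rbp = addr g.f := by
      rw [w_kept .rbp rfl, c_rbp, hfe]
      rfl
    have hbits' : Bits (g.Blk A) g.len s_1154cdr.mem g.f := by
      rw [← hfe]
      exact hpb.bits
    have hloop' := Floor.carry hloop hlt (by omega) w_rip e1 e2 w_inv w_eq hsame hws hun hbits'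
    have hgeo := Floor.geo hloop hlt
    obtain ⟨eG, _, ecc, _⟩ := Floor.fields_same hgeo hsame hws (by omega)
    have hcur' := Floor.floor4_carry hgeo hat.in4.cur (by omega) (by omega) (by omega) hsame hws
    have hcl' := Floor.classes_row hgeo hat.classes (by omega) (Or.inl ⟨Nat.le_refl _, by omega⟩) (by omega) (by omega) hsame
      (fun w hw => (hws w hw).winT)
    refine ReachVia.done ⟨⟨hloop', ?_, ?_, hcur'⟩, ?_, ?_, hj, ?_, ?_, ?_⟩
    · rw [eG, w_kept .rbx rfl]
      exact hat.in4.rbx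
    · rw [w_kept .r13 rfl]
      exact hat.in4.r13
    · rw [w_kept .r12 rfl]
      exact hat.r12
    · exact w_r14
    · rw [eG, ecc]
      exact hcl'
    · rw [eG]
      have ed : Floor1.class_dimensions s_1154cdr.mem (floorAt g v.mem i) j = z.toNat + 1 := by
        simp only [vacc, voff]
        rw [← hgi]
        have ea : (UInt64.ofNat gi + UInt64.ofNat j + 33 : Word).toNat = gi + 33 + j := by
          u_omega
        unfold Mem.u8
        rw [← eq_addr _ _ ea]
        exact hd1
      rw [ed]
      omega
    · have h2 := hpb.result.2 (by rw [earg]; decide)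
      rw [earg] at h2
      exact h2

end Vorbis.Spec.start_decoder_F4b

/-- The unit `start_decoder.F4b`: the statement is the claim `SegF4b` = the two lemmas in sequence. -/
theorem Vorbis.Spec.Worked.start_decoder_F4b_ok : Vorbis.Spec.start_decoder_F4b.Statement := by
  intro Lay hLay μ hμ u₀ hcode hgb hst1 g i A5 A mc j v hat
  refine (Vorbis.Spec.start_decoder_F4b.f4b_head hLay hμ hcode hgb hat).trans ?_
  intro w hw
  rcases hw with h5 | hmid
  · exact ReachVia.done (Or.inl h5)
  · exact (Vorbis.Spec.start_decoder_F4b.f4b_tail hLay hμ hcode hgb hst1 hmid).mono (fun _ hx => Or.inr hx)
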